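-- pv_equiv track=rewrite | github.com/untvim/TestTask_Tinkoff2023 | tink5.py | can_preserve_states
-- ===== SOURCE A (Python) =====
-- def can_preserve_states(graph, x, n):
--     visited = [False] * (n + 1)
--
--     def dfs(node):
--         visited[node] = True
--         for neighbor, weight in graph[node]:
--             if weight <= x and not visited[neighbor]:
--                 dfs(neighbor)
--
--     num_states = 0
--     for i in range(1, n + 1):
--         if not visited[i]:
--             dfs(i)
--             num_states += 1
--
--     return num_states == 1  # Штатов должно остаться ровно 1
-- ===== SOURCE B (Python) =====
-- def can_preserve_states(graph, x, n):
--     # Single-source closure from state 1: states are one component iff every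
--     # state 1..n is reachable from state 1 via roads of weight <= x.
--     if n < 1:
--         return False
--     seen = {1}
--     for _ in range(n - 1):
--         new = {nb for node in seen for nb, w in graph[node] if w <= x and nb not in seen}
--         if not new:
--             break
--         seen |= new
--     return len(seen) == n
-- ===== Notes on version B (the rewrite author's own statement) =====
-- stated objective: simpler
-- what changed: A's recursive DFS with a visited array and a restart counter over all states is replaced by a single round-based closure of the set reachable from state 1 (grow the seen-set by one edge per round, stop when nothing new), returning len(seen) == n.
-- outside the precondition, e.g. on can_preserve_states({1: [(0, 0)], 2: [], 0: []}, 0, 2): A returns False, B returns True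
import Mathlib
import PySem

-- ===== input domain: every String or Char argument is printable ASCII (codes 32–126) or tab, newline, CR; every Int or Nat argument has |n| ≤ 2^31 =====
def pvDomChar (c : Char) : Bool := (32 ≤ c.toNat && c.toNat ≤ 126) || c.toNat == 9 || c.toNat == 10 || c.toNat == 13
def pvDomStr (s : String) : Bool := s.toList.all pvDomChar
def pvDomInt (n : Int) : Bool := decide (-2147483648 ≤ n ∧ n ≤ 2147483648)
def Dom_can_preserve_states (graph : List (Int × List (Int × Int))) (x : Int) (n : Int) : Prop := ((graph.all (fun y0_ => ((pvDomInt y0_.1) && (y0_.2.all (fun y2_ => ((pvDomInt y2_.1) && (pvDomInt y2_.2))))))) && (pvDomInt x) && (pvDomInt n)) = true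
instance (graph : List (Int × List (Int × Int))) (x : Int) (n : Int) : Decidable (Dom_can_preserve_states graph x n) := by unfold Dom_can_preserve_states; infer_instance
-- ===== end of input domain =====

-- B replaces A's recursive multi-restart DFS by a single round-based closure from state 1
-- (one connected component iff every state 1..n is reachable from state 1); objective: simpler.

-- graph[node] : first-match lookup in the association list (Python dict access; none = KeyError)
def pvLook (graph : List (Int × List (Int × Int))) (node : Int) : Option (List (Int × Int)) :=
  PySem.Dict.get? ⟨graph⟩ node

-- ===== PORT A =====
-- A's inner `def dfs(node)` : recursion made total by a fuel argument (n+1 suffices: each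
-- call marks one unvisited slot); otherwise a step-for-step transliteration.
def pvDfs (graph : List (Int × List (Int × Int))) (x : Int) : Nat → List Bool → Int → List Bool
  | 0, visited, _ => visited
  | fuel+1, visited, node =>
    -- visited[node] = True
    let visited1 := PySem.List.pySetD visited node true
    -- for neighbor, weight in graph[node]:  (KeyError excluded by Pre_)
    ((pvLook graph node).getD []).foldl (fun w p =>
      if p.2 ≤ x then
        if PySem.List.pyGetD w p.1 false then w   -- not visited[neighbor] fails
        else pvDfs graph x fuel w p.1
      else w) visited1

-- one iteration of A's outer `for i in range(1, n+1)` loop, state = (visited, num_states)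
def pvVisit (graph : List (Int × List (Int × Int))) (x : Int) (fuel : Nat)
    (st : List Bool × Int) (i : Int) : List Bool × Int :=
  if PySem.List.pyGetD st.1 i false then st
  else (pvDfs graph x fuel st.1 i, st.2 + 1)

def can_preserve_states (graph : List (Int × List (Int × Int))) (x : Int) (n : Int) : Bool :=
  -- visited = [False]*(n+1); run the outer loop from (visited, num_states=0); num_states == 1
  decide (((PySem.List.pyRange 1 (n+1) 1).foldl (pvVisit graph x (n+1).toNat)
    (List.replicate (n+1).toNat false, 0)).2 = 1)

-- ===== PORT B =====
-- the set comprehension building `new` (nodes one admissible edge beyond seen)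
def pvNew (graph : List (Int × List (Int × Int))) (x : Int) (seen : PySem.Set Int) : PySem.Set Int :=
  PySem.Set.ofList (seen.flatMap (fun node =>
    ((pvLook graph node).getD []).filterMap (fun p =>
      if p.2 ≤ x ∧ p.1 ∉ seen then some p.1 else none)))

-- the `for _ in range(n-1)` loop with its early `break`
def pvRounds (graph : List (Int × List (Int × Int))) (x : Int) : Nat → PySem.Set Int → PySem.Set Int
  | 0, seen => seen
  | k+1, seen =>
    let nw := pvNew graph x seen
    if nw = [] then seen
    else pvRounds graph x k (PySem.Set.union seen nw)

def can_preserve_states_alt (graph : List (Int × List (Int × Int))) (x : Int) (n : Int) : Bool :=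
  if n < 1 then false
  else decide (((pvRounds graph x (n-1).toNat (PySem.Set.ofList [1])).length : Int) = n)

-- ===== PRECONDITION & SPEC =====
-- Pre_ excludes (a) graphs missing the dict key of some state 1..n (A raises KeyError) and
-- (b) graphs whose weight-admissible edges from states 1..n lead outside 1..n (malformed
-- state labels: A raises IndexError or silently relies on Python's negative-index
-- wraparound, and B's count of such stray labels is equally accidental).
def Pre_can_preserve_states (graph : List (Int × List (Int × Int))) (x : Int) (n : Int) : Prop :=
  n < 1 ∨
  (((PySem.Set.ofList (graph.map (·.1))).filter (fun k =>
      decide (1 ≤ k) && decide (k ≤ n) &&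
      ((pvLook graph k).getD []).all (fun p =>
        !decide (p.2 ≤ x) || (decide (1 ≤ p.1) && decide (p.1 ≤ n))))).length : Int) = n
instance (graph : List (Int × List (Int × Int))) (x : Int) (n : Int) : Decidable (Pre_can_preserve_states graph x n) := by
  unfold Pre_can_preserve_states; infer_instance

def pvWitness_can_preserve_states : (List (Int × List (Int × Int))) × Int × Int :=
  ([(1, [(2, 0)]), (2, [])], 0, 2)

def Spec_can_preserve_states (graph : List (Int × List (Int × Int))) (x : Int) (n : Int) (out : Bool) : Prop := out = can_preserve_states_alt graph x n
instance (graph : List (Int × List (Int × Int))) (x : Int) (n : Int) (out : Bool) : Decidable (Spec_can_preserve_states graph x n out) := by unfold Spec_can_preserve_states; infer_instance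

-- ===== CLAIM (what is proved, stated in full; the proofs are below) =====
def Claim_equal_can_preserve_states : Prop := ∀ (graph : List (Int × List (Int × Int))) (x : Int) (n : Int), Dom_can_preserve_states graph x n → Pre_can_preserve_states graph x n → Spec_can_preserve_states graph x n (can_preserve_states graph x n)

-- ===== LEMMAS AND PROOFS =====

-- proof-side vocabulary
def pvAdj (graph : List (Int × List (Int × Int))) (a : Int) : List (Int × Int) :=
  (pvLook graph a).getD []

def pvEdge (graph : List (Int × List (Int × Int))) (x n a b : Int) : Prop :=
  1 ≤ a ∧ a ≤ n ∧ ∃ p ∈ pvAdj graph a, p.1 = b ∧ p.2 ≤ x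

def pvReach (graph : List (Int × List (Int × Int))) (x n j : Int) : Prop :=
  Relation.ReflTransGen (pvEdge graph x n) 1 j

def vmem (v : List Bool) (i : Int) : Bool := PySem.List.pyGetD v i false
def cf (v : List Bool) : Nat := v.count false

-- the body of A's neighbour loop, named for the proofs
def pvStep (graph : List (Int × List (Int × Int))) (x : Int) (f : Nat) :
    List Bool → (Int × Int) → List Bool := fun w p =>
  if p.2 ≤ x then
    if PySem.List.pyGetD w p.1 false then w
    else pvDfs graph x f w p.1
  else w

lemma pvDfs_succ (graph : List (Int × List (Int × Int))) (x : Int) (f : Nat)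
    (v : List Bool) (node : Int) :
    pvDfs graph x (f+1) v node =
      (pvAdj graph node).foldl (pvStep graph x f) (PySem.List.pySetD v node true) := rfl

lemma pre_spec {graph : List (Int × List (Int × Int))} {x n : Int}
    (h : Pre_can_preserve_states graph x n) {i : Int} (h1 : 1 ≤ i) (h2 : i ≤ n) :
    ∀ p ∈ pvAdj graph i, p.2 ≤ x → 1 ≤ p.1 ∧ p.1 ≤ n := by
  rcases h with hn | hcount
  · omega
  · set K := (PySem.Set.ofList (graph.map (·.1))).filter (fun k =>
      decide (1 ≤ k) && decide (k ≤ n) &&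
      ((pvLook graph k).getD []).all (fun p =>
        !decide (p.2 ≤ x) || (decide (1 ≤ p.1) && decide (p.1 ≤ n)))) with hKdef
    have hnodup : K.Nodup := (PySem.Set.nodup_ofList _).filter _
    have hsub : K ⊆ PySem.List.pyRange 1 (n+1) 1 := by
      intro k hk
      have := (List.mem_filter.mp hk).2
      simp only [Bool.and_eq_true, decide_eq_true_eq] at this
      exact PySem.List.mem_pyRange_one.mpr ⟨this.1.1, by omega⟩
    have hperm : K.Perm (PySem.List.pyRange 1 (n+1) 1) := by
      refine (List.subperm_of_subset hnodup hsub).perm_of_length_le ?_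
      rw [PySem.List.length_pyRange_one]
      omega
    have hiK : i ∈ K := hperm.mem_iff.mpr (PySem.List.mem_pyRange_one.mpr ⟨h1, by omega⟩)
    have hgood := (List.mem_filter.mp hiK).2
    simp only [Bool.and_eq_true, decide_eq_true_eq, List.all_eq_true, Bool.or_eq_true,
      Bool.not_eq_eq_eq_not, Bool.not_true, decide_eq_false_iff_not] at hgood
    intro p hp hx
    rcases hgood.2 p hp with hbad | hok
    · exact absurd hx hbad
    · exact hok

-- ---- pyGetD / pySetD facts ----
lemma pyIdx_nonneg_inv {n : Nat} {i : Int} {k : Nat} (h0 : 0 ≤ i)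
    (h : PySem.List.pyIdx? n i = some k) : k = i.toNat ∧ i < (n : Int) := by
  unfold PySem.List.pyIdx? at h
  rw [if_pos h0] at h
  split_ifs at h with h1
  exact ⟨(Option.some_inj.mp h).symm, h1⟩

lemma pyIdx_lt {n : Nat} {i : Int} {k : Nat} (h : PySem.List.pyIdx? n i = some k) : k < n := by
  unfold PySem.List.pyIdx? at h
  split_ifs at h with h1 h2 h3 <;> simp_all <;> omega

lemma pyIdx_nonneg_eq {n : Nat} {i : Int} (h0 : 0 ≤ i) (h1 : i < (n : Int)) :
    PySem.List.pyIdx? n i = some i.toNat := by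
  unfold PySem.List.pyIdx?
  rw [if_pos h0, if_pos h1]

lemma vmem_set_true_mono (v : List Bool) (i j : Int) (h : vmem v j = true) :
    vmem (PySem.List.pySetD v i true) j = true := by
  unfold vmem PySem.List.pyGetD PySem.List.pyGet? at *
  unfold PySem.List.pySetD PySem.List.pySet?
  cases hk : PySem.List.pyIdx? v.length i with
  | none => simpa [hk] using h
  | some k =>
    have hklt := pyIdx_lt hk
    simp only [Option.map_some, Option.getD_some, List.length_set]
    cases hj : PySem.List.pyIdx? v.length j with
    | none => simp [hj] at h
    | some m =>
      simp only [hj, Option.bind_some] at h ⊢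
      rw [List.getElem?_set]
      by_cases he : k = m
      · subst he; simp [hklt]
      · simp [he]; exact h

lemma vmem_set_self (v : List Bool) (i : Int) (h0 : 0 ≤ i) (h1 : i < (v.length : Int)) :
    vmem (PySem.List.pySetD v i true) i = true := by
  unfold vmem PySem.List.pyGetD PySem.List.pyGet? PySem.List.pySetD PySem.List.pySet?
  rw [pyIdx_nonneg_eq h0 h1]
  simp only [Option.map_some, Option.getD_some, List.length_set]
  rw [pyIdx_nonneg_eq h0 (by simpa using h1)]
  simp only [Option.bind_some, List.getElem?_set]
  have : i.toNat < v.length := by omega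
  simp [this]

lemma vmem_set_elim (v : List Bool) (i j : Int) (h0 : 0 ≤ i) (h0' : 0 ≤ j)
    (h : vmem (PySem.List.pySetD v i true) j = true) : vmem v j = true ∨ j = i := by
  by_cases he : j = i
  · right; exact he
  · left
    unfold vmem PySem.List.pyGetD PySem.List.pyGet? PySem.List.pySetD PySem.List.pySet? at *
    cases hk : PySem.List.pyIdx? v.length i with
    | none => simpa [hk] using h
    | some k =>
      obtain ⟨hki, _⟩ := pyIdx_nonneg_inv h0 hk
      simp only [hk, Option.map_some, Option.getD_some, List.length_set] at h
      cases hj : PySem.List.pyIdx? v.length j with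
      | none => simp [hj] at h
      | some m =>
        obtain ⟨hmj, _⟩ := pyIdx_nonneg_inv h0' hj
        simp only [hj, Option.bind_some] at h ⊢
        rw [List.getElem?_set, if_neg (by omega)] at h
        exact h

lemma cf_set_le (v : List Bool) (i : Int) : cf (PySem.List.pySetD v i true) ≤ cf v := by
  unfold cf PySem.List.pySetD PySem.List.pySet?
  cases hk : PySem.List.pyIdx? v.length i with
  | none => simp
  | some k =>
    simp only [Option.map_some, Option.getD_some]
    by_cases hlt : k < v.length
    · rw [List.count_set hlt]; simp
    · rw [List.set_eq_of_length_le (by omega)]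

lemma vmem_false_elim (v : List Bool) (i : Int) (h0 : 0 ≤ i) (h1 : i < (v.length : Int))
    (h : vmem v i = false) : v[i.toNat] = false := by
  unfold vmem PySem.List.pyGetD PySem.List.pyGet? at h
  rw [pyIdx_nonneg_eq h0 h1] at h
  have hlt : i.toNat < v.length := by omega
  simpa [List.getElem?_eq_getElem hlt] using h

lemma cf_pos_of_vmem_false (v : List Bool) (i : Int) (h0 : 0 ≤ i) (h1 : i < (v.length : Int))
    (h : vmem v i = false) : 1 ≤ cf v := by
  have hget := vmem_false_elim v i h0 h1 h
  have hlt : i.toNat < v.length := by omega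
  unfold cf
  have : (false : Bool) ∈ v := hget ▸ List.getElem_mem hlt
  simpa [List.count_pos_iff] using this

lemma cf_set_lt (v : List Bool) (i : Int) (h0 : 0 ≤ i) (h1 : i < (v.length : Int))
    (h : vmem v i = false) : cf (PySem.List.pySetD v i true) + 1 = cf v := by
  have hget := vmem_false_elim v i h0 h1 h
  have hlt : i.toNat < v.length := by omega
  have hpos := cf_pos_of_vmem_false v i h0 h1 h
  unfold cf PySem.List.pySetD PySem.List.pySet? at *
  rw [pyIdx_nonneg_eq h0 h1]
  simp only [Option.map_some, Option.getD_some]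
  rw [List.count_set hlt]
  simp [hget]
  omega

lemma vmem_replicate (m : Nat) (i : Int) : vmem (List.replicate m false) i = false := by
  unfold vmem PySem.List.pyGetD PySem.List.pyGet?
  cases hk : PySem.List.pyIdx? (List.replicate m false).length i with
  | none => simp
  | some k => simp only [Option.bind_some, List.getElem?_replicate]; split <;> simp

-- ---- pvDfs facts ----
lemma dfs_length (graph : List (Int × List (Int × Int))) (x : Int) :
    ∀ (f : Nat) (v : List Bool) (node : Int), (pvDfs graph x f v node).length = v.length := by
  intro f
  induction f with
  | zero => intro v node; rfl
  | succ f ih =>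
    intro v node
    rw [pvDfs_succ]
    have aux : ∀ (l : List (Int × Int)) (w : List Bool),
        (l.foldl (pvStep graph x f) w).length = w.length := by
      intro l
      induction l with
      | nil => intro w; rfl
      | cons p t iht =>
        intro w
        rw [List.foldl_cons]
        rw [iht]
        unfold pvStep
        split_ifs <;> simp [ih]
    rw [aux, PySem.List.length_pySetD]

lemma fold_mono (graph : List (Int × List (Int × Int))) (x : Int) (f : Nat)
    (hdfs : ∀ (v : List Bool) (node j : Int), vmem v j = true → vmem (pvDfs graph x f v node) j = true) :
    ∀ (l : List (Int × Int)) (w : List Bool) (j : Int), vmem w j = true →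
      vmem (l.foldl (pvStep graph x f) w) j = true := by
  intro l
  induction l with
  | nil => intro w j h; exact h
  | cons p t iht =>
    intro w j h
    rw [List.foldl_cons]
    apply iht
    unfold pvStep
    split_ifs
    · exact h
    · exact hdfs w p.1 j h
    · exact h

lemma dfs_mono (graph : List (Int × List (Int × Int))) (x : Int) :
    ∀ (f : Nat) (v : List Bool) (node j : Int), vmem v j = true →
      vmem (pvDfs graph x f v node) j = true := by
  intro f
  induction f with
  | zero => intro v node j h; exact h
  | succ f ih =>
    intro v node j h
    rw [pvDfs_succ]
    exact fold_mono graph x f ih _ _ j (vmem_set_true_mono v node j h)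

lemma dfs_cf_le (graph : List (Int × List (Int × Int))) (x : Int) :
    ∀ (f : Nat) (v : List Bool) (node : Int), cf (pvDfs graph x f v node) ≤ cf v := by
  intro f
  induction f with
  | zero => intro v node; exact le_rfl
  | succ f ih =>
    intro v node
    rw [pvDfs_succ]
    have aux : ∀ (l : List (Int × Int)) (w : List Bool),
        cf (l.foldl (pvStep graph x f) w) ≤ cf w := by
      intro l
      induction l with
      | nil => intro w; exact le_rfl
      | cons p t iht =>
        intro w
        rw [List.foldl_cons]
        refine le_trans (iht _) ?_
        unfold pvStep
        split_ifs
        · exact le_rfl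
        · exact ih w p.1
        · exact le_rfl
    exact le_trans (aux _ _) (cf_set_le v node)

lemma dfs_marks (graph : List (Int × List (Int × Int))) (x : Int) (f : Nat) (v : List Bool)
    (node : Int) (h0 : 0 ≤ node) (h1 : node < (v.length : Int)) :
    vmem (pvDfs graph x (f+1) v node) node = true := by
  rw [pvDfs_succ]
  exact fold_mono graph x f (dfs_mono graph x f) _ _ node (vmem_set_self v node h0 h1)

lemma dfs_sound (graph : List (Int × List (Int × Int))) (x n : Int)
    (hpre : Pre_can_preserve_states graph x n) :
    ∀ (f : Nat) (v : List Bool) (node j : Int), 1 ≤ node → node ≤ n → 1 ≤ j → j ≤ n →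
      vmem (pvDfs graph x f v node) j = true →
      vmem v j = true ∨ Relation.ReflTransGen (pvEdge graph x n) node j := by
  intro f
  induction f with
  | zero => intro v node j _ _ _ _ h; exact Or.inl h
  | succ f ih =>
    intro v node j hn1 hn2 hj1 hj2 h
    rw [pvDfs_succ] at h
    -- fold invariant
    suffices aux : ∀ (l : List (Int × Int)) (w : List Bool),
        (∀ p ∈ l, p ∈ pvAdj graph node) →
        (∀ j', 1 ≤ j' → j' ≤ n → vmem w j' = true →
          vmem v j' = true ∨ Relation.ReflTransGen (pvEdge graph x n) node j') →
        ∀ j', 1 ≤ j' → j' ≤ n → vmem (l.foldl (pvStep graph x f) w) j' = true →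
          vmem v j' = true ∨ Relation.ReflTransGen (pvEdge graph x n) node j' by
      refine aux (pvAdj graph node) _ (fun p hp => hp) ?_ j hj1 hj2 h
      intro j' hj'1 _ hw
      rcases vmem_set_elim v node j' (by omega) (by omega) hw with hv | he
      · exact Or.inl hv
      · subst he; exact Or.inr Relation.ReflTransGen.refl
    intro l
    induction l with
    | nil => intro w _ hw; exact hw
    | cons p t iht =>
      intro w hl hw
      rw [List.foldl_cons]
      refine iht _ (fun q hq => hl q (List.mem_cons_of_mem p hq)) ?_
      intro j' hj'1 hj'2 hw'
      unfold pvStep at hw'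
      split_ifs at hw' with hx hv
      · exact hw j' hj'1 hj'2 hw'
      · have hp := hl p (List.mem_cons_self ..)
        have hrange := pre_spec hpre hn1 hn2 p hp hx
        rcases ih w p.1 j' hrange.1 hrange.2 hj'1 hj'2 hw' with h1 | h2
        · exact hw j' hj'1 hj'2 h1
        · exact Or.inr (Relation.ReflTransGen.head ⟨hn1, hn2, p, hp, rfl, hx⟩ h2)
      · exact hw j' hj'1 hj'2 hw'

lemma dfs_closed (graph : List (Int × List (Int × Int))) (x n : Int)
    (hpre : Pre_can_preserve_states graph x n) :
    ∀ (f : Nat) (v : List Bool) (node : Int), 1 ≤ node → node ≤ n →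
      v.length = (n+1).toNat → vmem v node = false → cf v ≤ f →
      ∀ a, 1 ≤ a → a ≤ n → vmem (pvDfs graph x f v node) a = true → vmem v a = false →
        ∀ p ∈ pvAdj graph a, p.2 ≤ x → vmem (pvDfs graph x f v node) p.1 = true := by
  intro f
  induction f with
  | zero =>
    intro v node hn1 hn2 hlen hnode hcf
    exfalso
    have : (1:Nat) ≤ cf v :=
      cf_pos_of_vmem_false v node (by omega) (by rw [hlen]; omega) hnode
    omega
  | succ f ih =>
    intro v node hn1 hn2 hlen hnode hcf
    have hn : 1 ≤ n := by omega
    have hnodeidx : node < (v.length : Int) := by rw [hlen]; omega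
    rw [pvDfs_succ]
    set v1 := PySem.List.pySetD v node true with hv1
    have hcf1 : cf v1 ≤ f := by
      rw [hv1]
      have := cf_set_lt v node (by omega) hnodeidx hnode
      omega
    have hlen1 : v1.length = (n+1).toNat := by rw [hv1, PySem.List.length_pySetD, hlen]
    -- fold invariant
    suffices aux : ∀ (l : List (Int × Int)) (w : List Bool),
        (∀ p ∈ l, p ∈ pvAdj graph node) →
        w.length = (n+1).toNat → cf w ≤ f →
        (∀ a, 1 ≤ a → a ≤ n → vmem w a = true → vmem v a = false →
          ∀ q ∈ pvAdj graph a, q.2 ≤ x → (vmem w q.1 = true ∨ (a = node ∧ q ∈ l))) →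
        ∀ a, 1 ≤ a → a ≤ n → vmem (l.foldl (pvStep graph x f) w) a = true → vmem v a = false →
          ∀ q ∈ pvAdj graph a, q.2 ≤ x → vmem (l.foldl (pvStep graph x f) w) q.1 = true by
      refine aux (pvAdj graph node) v1 (fun p hp => hp) hlen1 hcf1 ?_
      intro a ha1 ha2 hwa hva q hq _
      rcases vmem_set_elim v node a (by omega) (by omega) hwa with hv' | he
      · rw [hv'] at hva; cases hva
      · exact Or.inr ⟨he, he ▸ hq⟩
    intro l
    induction l with
    | nil =>
      intro w _ _ _ hinv a ha1 ha2 hwa hva q hq hqx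
      rcases hinv a ha1 ha2 hwa hva q hq hqx with h | ⟨_, h⟩
      · exact h
      · cases h
    | cons p t iht =>
      intro w hl hwlen hwcf hinv
      rw [List.foldl_cons]
      by_cases hx : p.2 ≤ x
      · have hp := hl p (List.mem_cons_self ..)
        have hprange := pre_spec hpre hn1 hn2 p hp hx
        by_cases hv : PySem.List.pyGetD w p.1 false = true
        · have hstep : pvStep graph x f w p = w := by unfold pvStep; rw [if_pos hx, if_pos hv]
          rw [hstep]
          refine iht _ (fun q hq => hl q (List.mem_cons_of_mem p hq)) hwlen hwcf ?_
          intro a ha1 ha2 hwa hva q hq hqx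
          rcases hinv a ha1 ha2 hwa hva q hq hqx with h | ⟨he, hmem⟩
          · exact Or.inl h
          · rcases List.mem_cons.mp hmem with hqp | hqt
            · subst hqp; exact Or.inl (by simpa [vmem] using hv)
            · exact Or.inr ⟨he, hqt⟩
        · have hstep : pvStep graph x f w p = pvDfs graph x f w p.1 := by
            unfold pvStep; rw [if_pos hx, if_neg hv]
          rw [hstep]
          set w' := pvDfs graph x f w p.1 with hw'
          have hpidx : p.1 < (w.length : Int) := by rw [hwlen]; omega
          have hcfpos : 1 ≤ cf w :=
            cf_pos_of_vmem_false w p.1 (by omega) hpidx (by simpa [vmem] using hv)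
          obtain ⟨f', rfl⟩ : ∃ f', f = f' + 1 := ⟨f - 1, by omega⟩
          have hmark : vmem w' p.1 = true :=
            dfs_marks graph x f' w p.1 (by omega) hpidx
          have hlen' : w'.length = (n+1).toNat := by
            rw [hw', dfs_length, hwlen]
          have hcf' : cf w' ≤ f' + 1 := le_trans (dfs_cf_le graph x _ w p.1) hwcf
          refine iht _ (fun q hq => hl q (List.mem_cons_of_mem p hq)) hlen' hcf' ?_
          intro a ha1 ha2 hwa hva q hq hqx
          by_cases hwa0 : vmem w a = true
          · rcases hinv a ha1 ha2 hwa0 hva q hq hqx with h | ⟨he, hmem⟩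
            · exact Or.inl (dfs_mono graph x _ w p.1 q.1 h)
            · rcases List.mem_cons.mp hmem with hqp | hqt
              · subst hqp; exact Or.inl hmark
              · exact Or.inr ⟨he, hqt⟩
          · -- a was marked by the recursive call: closedness from the fuel IH
            have := ih w p.1 hprange.1 hprange.2 hwlen
              (by simpa [vmem] using hv) hwcf a ha1 ha2 hwa
              (by simpa using hwa0) q hq hqx
            exact Or.inl this
      · have hstep : pvStep graph x f w p = w := by unfold pvStep; rw [if_neg hx]
        rw [hstep]
        refine iht _ (fun q hq => hl q (List.mem_cons_of_mem p hq)) hwlen hwcf ?_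
        intro a ha1 ha2 hwa hva q hq hqx
        rcases hinv a ha1 ha2 hwa hva q hq hqx with h | ⟨he, hmem⟩
        · exact Or.inl h
        · rcases List.mem_cons.mp hmem with hqp | hqt
          · subst hqp; exact absurd hqx hx
          · exact Or.inr ⟨he, hqt⟩

-- ---- A's outer loop ----
lemma outer_counter_le (graph : List (Int × List (Int × Int))) (x : Int) (F : Nat) :
    ∀ (L : List Int) (st : List Bool × Int), st.2 ≤ (L.foldl (pvVisit graph x F) st).2 := by
  intro L
  induction L with
  | nil => intro st; exact le_rfl
  | cons i t iht =>
    intro st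
    rw [List.foldl_cons]
    refine le_trans ?_ (iht _)
    unfold pvVisit
    split_ifs <;> simp

lemma outer_counter_eq_iff (graph : List (Int × List (Int × Int))) (x : Int) (F : Nat) :
    ∀ (L : List Int) (v : List Bool) (c : Int),
      (L.foldl (pvVisit graph x F) (v, c)).2 = c ↔ ∀ i ∈ L, vmem v i = true := by
  intro L
  induction L with
  | nil => intro v c; simp
  | cons i t iht =>
    intro v c
    rw [List.foldl_cons]
    by_cases hv : vmem v i = true
    · have hstep : pvVisit graph x F (v, c) i = (v, c) := by
        unfold pvVisit; rw [if_pos (by simpa [vmem] using hv)]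
      rw [hstep, iht]
      simp [hv]
    · have hstep : pvVisit graph x F (v, c) i = (pvDfs graph x F v i, c + 1) := by
        unfold pvVisit; rw [if_neg (by simpa [vmem] using hv)]
      rw [hstep]
      constructor
      · intro h
        exfalso
        have := outer_counter_le graph x F t (pvDfs graph x F v i, c + 1)
        simp only [h] at this
        omega
      · intro h
        exact absurd (h i (List.mem_cons_self ..)) hv

lemma A_char (graph : List (Int × List (Int × Int))) (x n : Int) (hn : 1 ≤ n)
    (hpre : Pre_can_preserve_states graph x n) :
    (can_preserve_states graph x n = true ↔ ∀ i, 1 ≤ i → i ≤ n → pvReach graph x n i) := by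
  unfold can_preserve_states
  set F := (n+1).toNat with hF
  set v0 : List Bool := List.replicate F false with hv0
  have hlen0 : v0.length = F := by rw [hv0, List.length_replicate]
  have hrange : PySem.List.pyRange 1 (n+1) 1 = 1 :: PySem.List.pyRange 2 (n+1) 1 := by
    have := PySem.List.pyRange_one_cons (a := 1) (b := n+1) (by omega)
    simpa using this
  have hv01 : vmem v0 1 = false := vmem_replicate F 1
  have hstep1 : pvVisit graph x F (v0, 0) 1 = (pvDfs graph x F v0 1, 1) := by
    unfold pvVisit
    rw [if_neg (by simpa [vmem] using hv01)]
    rfl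
  set S1 := pvDfs graph x F v0 1 with hS1
  rw [hrange, List.foldl_cons, hstep1, decide_eq_true_iff,
    outer_counter_eq_iff graph x F _ S1 1]
  have hFge : 2 ≤ F := by omega
  have hFcast : (F : Int) = n + 1 := by omega
  have hcfv0 : cf v0 = F := by
    unfold cf
    rw [hv0, List.count_replicate]
    simp
  have hmark1 : vmem S1 1 = true := by
    rw [hS1, show F = (F - 1) + 1 from by omega]
    exact dfs_marks graph x (F - 1) v0 1 (by omega) (by rw [hlen0]; omega)
  have hsound : ∀ i, 1 ≤ i → i ≤ n → vmem S1 i = true → pvReach graph x n i := by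
    intro i hi1 hi2 hv
    rcases dfs_sound graph x n hpre F v0 1 i le_rfl hn hi1 hi2 hv with h | h
    · rw [vmem_replicate] at h; cases h
    · exact h
  have hcomp : ∀ j, pvReach graph x n j → vmem S1 j = true := by
    intro j h
    unfold pvReach at h
    induction h with
    | refl => exact hmark1
    | tail _ e ihr =>
      rcases e with ⟨ha1, ha2, p, hp, rfl, hx⟩
      exact dfs_closed graph x n hpre F v0 1 le_rfl hn (by rw [hlen0]) (vmem_replicate F 1)
        (by omega) _ ha1 ha2 ihr (vmem_replicate F _) p hp hx
  constructor
  · intro h i hi1 hi2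
    refine hsound i hi1 hi2 ?_
    by_cases hi : i = 1
    · rw [hi]; exact hmark1
    · exact h i (PySem.List.mem_pyRange_one.mpr ⟨by omega, by omega⟩)
  · intro h i hi
    rcases PySem.List.mem_pyRange_one.mp hi with ⟨hi1, hi2⟩
    exact hcomp i (h i (by omega) (by omega))

-- ---- B's rounds ----
lemma mem_pvNew (graph : List (Int × List (Int × Int))) (x : Int) (s : PySem.Set Int) (j : Int) :
    j ∈ pvNew graph x s ↔ ∃ a ∈ s, ∃ p ∈ pvAdj graph a, p.1 = j ∧ p.2 ≤ x ∧ j ∉ s := by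
  unfold pvNew
  rw [PySem.Set.mem_ofList]
  simp only [List.mem_flatMap, List.mem_filterMap]
  constructor
  · rintro ⟨a, ha, p, hp, hifp⟩
    by_cases hc : p.2 ≤ x ∧ p.1 ∉ s
    · rw [if_pos hc, Option.some_inj] at hifp
      exact ⟨a, ha, p, hp, hifp, hc.1, hifp ▸ hc.2⟩
    · rw [if_neg hc] at hifp; cases hifp
  · rintro ⟨a, ha, p, hp, rfl, hx, hns⟩
    exact ⟨a, ha, p, hp, by rw [if_pos ⟨hx, hns⟩]⟩

lemma pvNew_nil_iff (graph : List (Int × List (Int × Int))) (x : Int) (s : PySem.Set Int) :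
    pvNew graph x s = [] ↔ ∀ a ∈ s, ∀ p ∈ pvAdj graph a, p.2 ≤ x → p.1 ∈ s := by
  rw [List.eq_nil_iff_forall_not_mem]
  constructor
  · intro h a ha p hp hx
    by_contra hns
    exact h p.1 ((mem_pvNew graph x s p.1).mpr ⟨a, ha, p, hp, rfl, hx, hns⟩)
  · intro h j hj
    rcases (mem_pvNew graph x s j).mp hj with ⟨a, ha, p, hp, rfl, hx, hns⟩
    exact hns (h a ha p hp hx)

lemma reach_range (graph : List (Int × List (Int × Int))) (x n : Int) (hn : 1 ≤ n)
    (hpre : Pre_can_preserve_states graph x n) (j : Int) (h : pvReach graph x n j) :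
    1 ≤ j ∧ j ≤ n := by
  unfold pvReach at h
  induction h with
  | refl => exact ⟨le_rfl, hn⟩
  | tail _ e _ =>
    rcases e with ⟨ha1, ha2, p, hp, rfl, hx⟩
    exact pre_spec hpre ha1 ha2 p hp hx

lemma rounds_sound (graph : List (Int × List (Int × Int))) (x n : Int) (hn : 1 ≤ n)
    (hpre : Pre_can_preserve_states graph x n) :
    ∀ (k : Nat) (s : PySem.Set Int), s.Nodup → (∀ j ∈ s, pvReach graph x n j) →
      (pvRounds graph x k s).Nodup ∧ ∀ j ∈ pvRounds graph x k s, pvReach graph x n j := by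
  intro k
  induction k with
  | zero => intro s h1 h2; exact ⟨h1, h2⟩
  | succ k ih =>
    intro s h1 h2
    rw [pvRounds]
    split_ifs with hnil
    · exact ⟨h1, h2⟩
    · refine ih _ (PySem.Set.nodup_update s _ h1) ?_
      intro j hj
      rcases (PySem.Set.mem_update s _ j).mp hj with hjs | hjn
      · exact h2 j hjs
      · rcases (mem_pvNew graph x s j).mp hjn with ⟨a, ha, p, hp, rfl, hx, _⟩
        have hr := h2 a ha
        have hrange := reach_range graph x n hn hpre a hr
        exact Relation.ReflTransGen.tail hr ⟨hrange.1, hrange.2, p, hp, rfl, hx⟩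

lemma rounds_closed_or_big (graph : List (Int × List (Int × Int))) (x : Int) :
    ∀ (k : Nat) (s : PySem.Set Int), s.Nodup →
      pvNew graph x (pvRounds graph x k s) = [] ∨
      s.length + k ≤ (pvRounds graph x k s).length := by
  intro k
  induction k with
  | zero => intro s _; right; simp [pvRounds]
  | succ k ih =>
    intro s hnd
    rw [pvRounds]
    split_ifs with hnil
    · exact Or.inl hnil
    · set nw := pvNew graph x s with hnw
      have hdisj : ∀ y ∈ nw, y ∉ s := by
        intro y hy
        rcases (mem_pvNew graph x s y).mp hy with ⟨_, _, _, _, rfl, _, hns⟩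
        exact hns
      have hnodupnw : nw.Nodup := PySem.Set.nodup_ofList _
      have hunion : PySem.Set.union s nw = s ++ nw :=
        PySem.Set.update_eq_append_of_disjoint s nw hnodupnw hdisj
      have hlen : (PySem.Set.union s nw).length = s.length + nw.length := by
        rw [hunion, List.length_append]
      have hnwpos : 1 ≤ nw.length := by
        cases hnwe : nw with
        | nil => exact absurd hnwe hnil
        | cons a t => simp
      have hnodupu : (PySem.Set.union s nw).Nodup := PySem.Set.nodup_update s nw hnd
      rcases ih (PySem.Set.union s nw) hnodupu with h | h
      · exact Or.inl h
      · right; omega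

lemma rounds_subset (graph : List (Int × List (Int × Int))) (x : Int) :
    ∀ (k : Nat) (s : PySem.Set Int) (j : Int), j ∈ s → j ∈ pvRounds graph x k s := by
  intro k
  induction k with
  | zero => intro s j h; exact h
  | succ k ih =>
    intro s j h
    rw [pvRounds]
    split_ifs with hnil
    · exact h
    · exact ih _ j ((PySem.Set.mem_update s _ j).mpr (Or.inl h))

lemma complete_of_closed (graph : List (Int × List (Int × Int))) (x n : Int)
    (R : PySem.Set Int) (h1 : (1 : Int) ∈ R)
    (hcl : ∀ a ∈ R, ∀ p ∈ pvAdj graph a, p.2 ≤ x → p.1 ∈ R) :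
    ∀ j, pvReach graph x n j → j ∈ R := by
  intro j h
  unfold pvReach at h
  induction h with
  | refl => exact h1
  | tail _ e ihr =>
    rcases e with ⟨_, _, p, hp, rfl, hx⟩
    exact hcl _ ihr p hp hx

lemma B_char (graph : List (Int × List (Int × Int))) (x n : Int) (hn : 1 ≤ n)
    (hpre : Pre_can_preserve_states graph x n) :
    (can_preserve_states_alt graph x n = true ↔ ∀ i, 1 ≤ i → i ≤ n → pvReach graph x n i) := by
  unfold can_preserve_states_alt
  rw [if_neg (by omega)]
  set s0 : PySem.Set Int := PySem.Set.ofList [1] with hs0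
  have hs0' : s0 = [1] := rfl
  set R := pvRounds graph x (n-1).toNat s0 with hR
  have hnd0 : s0.Nodup := by rw [hs0']; simp
  have hsound := rounds_sound graph x n hn hpre (n-1).toNat s0 hnd0
    (by intro j hj; rw [hs0'] at hj; simp at hj; rw [hj]; exact Relation.ReflTransGen.refl)
  have hRnd : R.Nodup := hsound.1
  have hRreach : ∀ j ∈ R, pvReach graph x n j := hsound.2
  have hRrange : ∀ j ∈ R, 1 ≤ j ∧ j ≤ n := fun j hj =>
    reach_range graph x n hn hpre j (hRreach j hj)
  have h1R : (1 : Int) ∈ R := rounds_subset graph x (n-1).toNat s0 1 (by rw [hs0']; simp)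
  have hsub : R ⊆ PySem.List.pyRange 1 (n+1) 1 := by
    intro j hj
    exact PySem.List.mem_pyRange_one.mpr ⟨(hRrange j hj).1, by have := (hRrange j hj).2; omega⟩
  have hlenrange : (PySem.List.pyRange 1 (n+1) 1).length = n.toNat := by
    rw [PySem.List.length_pyRange_one]; congr 1; omega
  have hRle : R.length ≤ n.toNat := by
    have := (List.subperm_of_subset hRnd hsub).length_le
    omega
  -- R is closed under admissible edges
  have hclosed : ∀ a ∈ R, ∀ p ∈ pvAdj graph a, p.2 ≤ x → p.1 ∈ R := by
    rcases rounds_closed_or_big graph x (n-1).toNat s0 hnd0 with h | h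
    · exact (pvNew_nil_iff graph x R).mp h
    · -- R has n elements: it is all of 1..n, hence closed by Pre_
      have hlen : R.length = n.toNat := by
        rw [← hR] at h
        have hs0len : s0.length = 1 := rfl
        omega
      intro a ha p hp hx
      have hperm : R.Perm (PySem.List.pyRange 1 (n+1) 1) :=
        (List.subperm_of_subset hRnd hsub).perm_of_length_le (by omega)
      have harange := hRrange a ha
      have hprange := pre_spec hpre harange.1 harange.2 p hp hx
      exact hperm.mem_iff.mpr (PySem.List.mem_pyRange_one.mpr ⟨hprange.1, by omega⟩)
  have hcompl : ∀ j, pvReach graph x n j → j ∈ R :=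
    complete_of_closed graph x n R h1R hclosed
  constructor
  · intro hlen i hi1 hi2
    have hperm : R.Perm (PySem.List.pyRange 1 (n+1) 1) :=
      (List.subperm_of_subset hRnd hsub).perm_of_length_le (by simp at hlen; omega)
    have hiR : i ∈ R := hperm.mem_iff.mpr (PySem.List.mem_pyRange_one.mpr ⟨hi1, by omega⟩)
    exact hRreach i hiR
  · intro hall
    have hsub2 : PySem.List.pyRange 1 (n+1) 1 ⊆ R := by
      intro j hj
      rcases PySem.List.mem_pyRange_one.mp hj with ⟨hj1, hj2⟩
      exact hcompl j (hall j hj1 (by omega))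
    have hge : n.toNat ≤ R.length := by
      have := (List.subperm_of_subset (PySem.List.nodup_pyRange_one 1 (n+1)) hsub2).length_le
      omega
    simp
    omega

-- ===== VERDICT (by name: the statement is the Claim_ definition above) =====
theorem can_preserve_states_spec : Claim_equal_can_preserve_states := by
  intro graph x n _ hpre
  unfold Spec_can_preserve_states
  by_cases hn : 1 ≤ n
  · rw [Bool.eq_iff_iff, A_char graph x n hn hpre, B_char graph x n hn hpre]
  · -- n < 1 : both sides are false
    have h1 : can_preserve_states graph x n = false := by
      unfold can_preserve_states
      rw [PySem.List.pyRange_one_eq_nil (by omega)]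
      simp
    have h2 : can_preserve_states_alt graph x n = false := by
      unfold can_preserve_states_alt
      rw [if_pos (by omega)]
    rw [h1, h2]
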